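-- pv_equiv track=rewrite | github.com/summerlight636/AlgorithmStudy | 프로그래머스/고득점 Kit/최소 직사각형.py | solution
-- ===== SOURCE A (Python) =====
-- def solution(sizes):
--     answer = 0
--
--     w_max = 0
--     h_max = 0
--     for w, h in sizes:
--         # 이 부분을 간단히 w = max(sizes), h = min(sizes) 로 생각할 수 있다.
--         if w > h:
--             if w_max < w:
--                 w_max = w
--             if h_max < h:
--                 h_max = h
--         else:
--             if w_max < h:
--                 w_max = h
--             if h_max < w:
--                 h_max = w
--     return w_max * h_max
-- ===== SOURCE B (Python) =====
-- def solution(sizes):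
--     longs = sorted([0] + [max(w, h) for w, h in sizes])
--     shorts = sorted([0] + [min(w, h) for w, h in sizes])
--     return longs[-1] * shorts[-1]
-- ===== Notes on version B (the rewrite author's own statement) =====
-- stated objective: alternative
-- what changed: Replaces A's single branchy accumulator loop (two running maxima updated through nested if w>h comparisons) with a sort-then-pick strategy: sort the long sides and the short sides (each seeded with 0, matching A's 0 floor and the empty input) and multiply the last elements of the two sorted lists.
import Mathlib
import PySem

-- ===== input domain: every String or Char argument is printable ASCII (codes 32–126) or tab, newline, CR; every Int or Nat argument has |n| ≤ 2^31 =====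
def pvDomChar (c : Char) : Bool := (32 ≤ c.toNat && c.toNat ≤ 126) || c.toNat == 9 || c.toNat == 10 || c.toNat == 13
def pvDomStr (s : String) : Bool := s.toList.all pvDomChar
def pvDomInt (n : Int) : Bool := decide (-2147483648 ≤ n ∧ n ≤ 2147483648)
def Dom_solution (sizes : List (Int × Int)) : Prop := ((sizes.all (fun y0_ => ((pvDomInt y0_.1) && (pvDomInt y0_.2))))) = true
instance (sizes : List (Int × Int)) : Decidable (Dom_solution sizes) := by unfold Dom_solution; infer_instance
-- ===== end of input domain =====

-- B replaces A's single branchy accumulator loop with sort-then-pick: sort long sides and short sides (seeded with 0) and multiply the last elements; objective: alternative.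


-- ===== PORT A =====
-- literal transliteration: one pass, two accumulators, nested ifs in the same order
def solution (sizes : List (Int × Int)) : Int :=
  let st := sizes.foldl (fun (st : Int × Int) (p : Int × Int) =>
    let w := p.1
    let h := p.2
    let w_max := st.1
    let h_max := st.2
    if w > h then
      ((if w_max < w then w else w_max), (if h_max < h then h else h_max))
    else
      ((if w_max < h then h else w_max), (if h_max < w then w else h_max))) (0, 0)
  st.1 * st.2

-- ===== PORT B =====
-- Source B: sorted([0] + [max(w,h) …])[-1] * sorted([0] + [min(w,h) …])[-1];
-- the lists are nonempty (they carry the 0 seed), so xs[-1] never raises and .getD 0 is never the fallback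
def solution_alt (sizes : List (Int × Int)) : Int :=
  let longs := PySem.List.sorted (0 :: sizes.map (fun p => max p.1 p.2)) (fun x => x) false
  let shorts := PySem.List.sorted (0 :: sizes.map (fun p => min p.1 p.2)) (fun x => x) false
  (PySem.List.pyGet? longs (-1)).getD 0 * (PySem.List.pyGet? shorts (-1)).getD 0

-- ===== PRECONDITION & SPEC =====
def Spec_solution (sizes : List (Int × Int)) (out : Int) : Prop := out = solution_alt sizes
instance (sizes : List (Int × Int)) (out : Int) : Decidable (Spec_solution sizes out) := by unfold Spec_solution; infer_instance

-- ===== CLAIM (what is proved, stated in full; the proofs are below) =====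
def Claim_equal_solution : Prop := ∀ (sizes : List (Int × Int)), Dom_solution sizes → Spec_solution sizes (solution sizes)

-- ===== LEMMAS AND PROOFS =====

-- A's loop from any accumulator pair equals the two independent running-max folds
theorem solution_loop_eq (sizes : List (Int × Int)) (a b : Int) :
    sizes.foldl (fun (st : Int × Int) (p : Int × Int) =>
      let w := p.1
      let h := p.2
      let w_max := st.1
      let h_max := st.2
      if w > h then
        ((if w_max < w then w else w_max), (if h_max < h then h else h_max))
      else
        ((if w_max < h then h else w_max), (if h_max < w then w else h_max))) (a, b)
    = ((sizes.map (fun p => max p.1 p.2)).foldl max a,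
       (sizes.map (fun p => min p.1 p.2)).foldl max b) := by
  induction sizes generalizing a b with
  | nil => simp
  | cons p rest ih =>
    obtain ⟨w, h⟩ := p
    simp only [List.foldl_cons, List.map_cons]
    rw [show (if w > h then
        ((if a < w then w else a), (if b < h then h else b))
      else
        ((if a < h then h else a), (if b < w then w else b))) = (max a (max w h), max b (min w h)) by
      split_ifs <;> simp_all <;> omega]
    exact ih _ _

-- the last element of sorted(0 :: xs) is the running max of xs seeded with 0
theorem last_sorted_eq_foldl_max (xs : List Int) :
    (PySem.List.pyGet? (PySem.List.sorted (0 :: xs) (fun x => x) false) (-1)).getD 0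
      = xs.foldl max 0 := by
  rw [PySem.List.pyGet?_neg_one]
  set s := PySem.List.sorted (0 :: xs) (fun x => x) false with hs
  have hne : s ≠ [] := by
    simp [hs, PySem.List.sorted_eq_nil_iff]
  have hlast : s.getLast? = some (s.getLast hne) := List.getLast?_eq_some_getLast hne
  rw [hlast, Option.getD_some]
  have hperm : s.Perm (0 :: xs) := PySem.List.sorted_perm _ _ _
  have hmem_iff : ∀ y, y ∈ s ↔ y ∈ 0 :: xs := fun y => hperm.mem_iff
  -- getLast s ≤ foldl max 0 xs : getLast s is an element of 0 :: xs
  have h1 : s.getLast hne ≤ xs.foldl max 0 := by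
    have : s.getLast hne ∈ 0 :: xs := (hmem_iff _).mp (List.getLast_mem hne)
    rcases List.mem_cons.mp this with h | h
    · rw [h]; exact (PySem.List.le_foldl_max xs 0).1
    · exact (PySem.List.le_foldl_max xs 0).2 _ h
  -- foldl max 0 xs ≤ getLast s : it is an element of s, and every element ≤ the last
  have h2 : xs.foldl max 0 ≤ s.getLast hne := by
    have hmem : xs.foldl max 0 ∈ s := by
      rcases PySem.List.foldl_max_mem xs 0 with h | h
      · exact (hmem_iff _).mpr (by simp [h])
      · exact (hmem_iff _).mpr (List.mem_cons_of_mem _ h)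
    obtain ⟨p, hp, hpe⟩ := List.getElem_of_mem hmem
    have hlen : 0 < s.length := List.length_pos_iff.mpr hne
    have hq : s.length - 1 < ((PySem.List.sorted (0 :: xs) (fun x => x) false).length) := by
      rw [← hs]; omega
    have hmono := PySem.List.sorted_id_getElem_mono (xs := 0 :: xs)
      (p := p) (q := s.length - 1) (by have := hp; rw [← hs] at hq; omega) hq
    rw [List.getLast_eq_getElem, ← hpe]
    exact hmono
  omega

-- ===== VERDICT (by name: the statement is the Claim_ definition above) =====
theorem solution_spec : Claim_equal_solution := by
  intro sizes _
  unfold Spec_solution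
  simp only [solution, solution_alt]
  rw [solution_loop_eq]
  rw [last_sorted_eq_foldl_max, last_sorted_eq_foldl_max]
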